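-- pv_equiv track=rewrite | github.com/notoraptor/pysaurus | pysaurus/core/stringsplit.py | get_next_word_position
-- ===== SOURCE A (Python) =====
-- import unicodedata
--
-- UNICODE_MATH_CATEGORY = "Sm"
--
-- UNICODE_MODIFIED_CATEGORY = "Sk"
--
-- def is_word(c: str) -> bool:
--     return c.isalnum() or c == "_"
--
-- def is_punc(c: str) -> bool:
--     uc = unicodedata.category(c)
--     return uc.startswith("P") or uc in (
--         UNICODE_MATH_CATEGORY,
--         UNICODE_MODIFIED_CATEGORY,
--     )
--
-- def is_currency(c: str) -> bool:
--     uc = unicodedata.category(c)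
--     return uc == "Sc"
--
-- CAT_NONE = -1
--
-- CAT_SPACE = 0
--
-- CAT_WORD = 1
--
-- CAT_PUNC = 2
--
-- CAT_CURR = 3
--
-- CAT_OTHER = 4
--
-- def get_category(c: str) -> int:
--     if c == " ":
--         return CAT_SPACE
--     elif is_word(c):
--         return CAT_WORD
--     elif is_punc(c):
--         return CAT_PUNC
--     elif is_currency(c):
--         return CAT_CURR
--     else:
--         return CAT_OTHER
--
-- def get_next_word_position(text: str, start: int):
--     start = min(max(0, start), len(text) - 1)
--     cat = CAT_NONE
--     for i in range(start, len(text)):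
--         local_cat = get_category(text[i])
--         if cat == CAT_NONE:
--             if local_cat != CAT_SPACE:
--                 cat = local_cat
--         elif local_cat != cat:
--             return i
--     else:
--         return len(text)
-- ===== SOURCE B (Python) =====
-- import unicodedata
--
-- UNICODE_MATH_CATEGORY = "Sm"
-- UNICODE_MODIFIED_CATEGORY = "Sk"
--
-- def is_word(c: str) -> bool:
--     return c.isalnum() or c == "_"
--
-- def is_punc(c: str) -> bool:
--     uc = unicodedata.category(c)
--     return uc.startswith("P") or uc in (UNICODE_MATH_CATEGORY, UNICODE_MODIFIED_CATEGORY)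
--
-- def is_currency(c: str) -> bool:
--     return unicodedata.category(c) == "Sc"
--
-- CAT_NONE = -1
-- CAT_SPACE = 0
-- CAT_WORD = 1
-- CAT_PUNC = 2
-- CAT_CURR = 3
-- CAT_OTHER = 4
--
-- def get_category(c: str) -> int:
--     if c == " ":
--         return CAT_SPACE
--     elif is_word(c):
--         return CAT_WORD
--     elif is_punc(c):
--         return CAT_PUNC
--     elif is_currency(c):
--         return CAT_CURR
--     else:
--         return CAT_OTHER
--
-- def get_next_word_position(text: str, start: int):
--     n = len(text)
--     s = min(max(0, start), n - 1)
--     # run-length encode the suffix by category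
--     runs = []
--     for c in text[s:]:
--         g = get_category(c)
--         if runs and runs[-1][0] == g:
--             runs[-1] = (g, runs[-1][1] + 1)
--         else:
--             runs.append((g, 1))
--     if not runs:
--         return n
--     g, k = runs[0]
--     if g != CAT_SPACE:
--         return s + k
--     if len(runs) == 1:
--         return n
--     return s + k + runs[1][1]
-- ===== Notes on version B (the rewrite author's own statement) =====
-- stated objective: alternative
-- what changed: A's single early-returning state-machine scan (CAT_NONE sentinel) is replaced by building a run-length encoding of the suffix by category and computing the answer arithmetically from the lengths of the first one or two runs, with no early exit and no sentinel state.
-- outside the precondition, e.g. on get_next_word_position('', 0): A raises IndexError, B returns 0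
import Mathlib
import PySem

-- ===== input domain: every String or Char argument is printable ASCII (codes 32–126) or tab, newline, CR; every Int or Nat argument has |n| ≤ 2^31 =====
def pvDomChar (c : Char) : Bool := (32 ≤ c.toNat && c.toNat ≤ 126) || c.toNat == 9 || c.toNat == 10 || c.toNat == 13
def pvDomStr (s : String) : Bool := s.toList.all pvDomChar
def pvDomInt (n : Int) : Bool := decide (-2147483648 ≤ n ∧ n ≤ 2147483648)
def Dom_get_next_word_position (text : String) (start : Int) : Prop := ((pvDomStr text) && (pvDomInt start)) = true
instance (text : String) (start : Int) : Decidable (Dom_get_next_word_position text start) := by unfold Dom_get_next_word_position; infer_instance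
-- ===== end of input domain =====

-- B replaces A's early-returning state-machine scan by a run-length encoding of the
-- suffix by category plus arithmetic on the first one or two run lengths (alternative).

-- ===== PORT A =====
-- get_category, exact on the ASCII/tab/newline/CR domain: among those characters,
-- ' '→SPACE, alnum/_→WORD, '$'→Sc (CURR), tab/newline/CR→Cc (OTHER), every other
-- printable character has Unicode category P*, Sm or Sk (PUNC).
def getCategory (c : Char) : Int :=
  if c = ' ' then 0
  else if c.isAlphanum || c = '_' then 1
  else if c = '$' then 3
  else if c = '\t' || c = '\n' || c = '\r' then 4
  else 2

-- A's for-loop over range(start, len(text)) carrying the `cat` state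
def aLoop (n : Nat) (cs : List Char) (i : Nat) (cat : Int) : Int :=
  match cs with
  | [] => (n : Int)
  | c :: rest =>
    let localCat := getCategory c
    if cat = -1 then
      if localCat ≠ 0 then aLoop n rest (i + 1) localCat
      else aLoop n rest (i + 1) cat
    else if localCat ≠ cat then (i : Int)
    else aLoop n rest (i + 1) cat

def get_next_word_position (text : String) (start : Int) : Int :=
  let cs := text.toList
  let n := cs.length
  let s : Int := min (max 0 start) ((n : Int) - 1)
  aLoop n (cs.drop s.toNat) s.toNat (-1)

-- ===== PORT B =====
-- one step of the run-length-encoding loop: merge into the last run or open a new one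
def rleStep (acc : List (Int × Nat)) (c : Char) : List (Int × Nat) :=
  match acc.getLast? with
  | some (g, k) =>
    if g = getCategory c then acc.dropLast ++ [(g, k + 1)]
    else acc ++ [(getCategory c, 1)]
  | none => [(getCategory c, 1)]

def get_next_word_position_alt (text : String) (start : Int) : Int :=
  let cs := text.toList
  let n := cs.length
  let s : Int := min (max 0 start) ((n : Int) - 1)
  let runs := (PySem.List.slice cs (some s) none).foldl rleStep []
  match runs with
  | [] => (n : Int)
  | (g, k) :: rest =>
    if g ≠ 0 then s + (k : Int)
    else
      match rest with
      | [] => (n : Int)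
      | (_, k2) :: _ => s + (k : Int) + (k2 : Int)

-- ===== PRECONDITION & SPEC =====
-- Pre_ excludes only the empty string, on which A raises IndexError (text[-1]).
def Pre_get_next_word_position (text : String) (start : Int) : Prop := text ≠ ""
instance (text : String) (start : Int) : Decidable (Pre_get_next_word_position text start) := by unfold Pre_get_next_word_position; infer_instance
def pvWitness_get_next_word_position : String × Int := (" ab, c", -2)

def Spec_get_next_word_position (text : String) (start : Int) (out : Int) : Prop := out = get_next_word_position_alt text start
instance (text : String) (start : Int) (out : Int) : Decidable (Spec_get_next_word_position text start out) := by unfold Spec_get_next_word_position; infer_instance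

-- ===== CLAIM (what is proved, stated in full; the proofs are below) =====
def Claim_equal_get_next_word_position : Prop := ∀ (text : String) (start : Int), Dom_get_next_word_position text start → Pre_get_next_word_position text start → Spec_get_next_word_position text start (get_next_word_position text start)

-- ===== LEMMAS AND PROOFS =====

theorem getCategory_ne_neg_one (c : Char) : getCategory c ≠ -1 := by
  unfold getCategory; split_ifs <;> decide

-- the RLE fold never touches runs before the last one
theorem foldl_rleStep_append (cs : List Char) :
    ∀ (pre : List (Int × Nat)) (g : Int) (k : Nat),
      cs.foldl rleStep (pre ++ [(g, k)]) = pre ++ cs.foldl rleStep [(g, k)] := by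
  induction cs with
  | nil => intro pre g k; rfl
  | cons c rest ih =>
    intro pre g k
    simp only [List.foldl_cons, rleStep, List.getLast?_append, List.getLast?_singleton,
      Option.some_or, List.dropLast_concat]
    by_cases h : g = getCategory c
    · simp [h, ih]
    · simp only [h, if_false]
      have h1 := ih (pre ++ [(g, k)]) (getCategory c) 1
      have h2 := ih [(g, k)] (getCategory c) 1
      simp only [List.append_assoc, List.singleton_append, List.cons_append,
        List.nil_append] at h1 h2 ⊢
      rw [h1, h2]

-- the run-length fold starting from one open run
def fRun (g : Int) (k : Nat) (cs : List Char) : List (Int × Nat) :=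
  cs.foldl rleStep [(g, k)]

theorem fRun_cons (g : Int) (k : Nat) (c : Char) (cs : List Char) :
    fRun g k (c :: cs) =
      if g = getCategory c then fRun g (k + 1) cs
      else (g, k) :: fRun (getCategory c) 1 cs := by
  simp only [fRun, List.foldl_cons, rleStep, List.getLast?_singleton]
  by_cases h : g = getCategory c
  · simp [h]
  · simp only [h, if_neg h, if_false, List.dropLast_singleton]
    simpa using foldl_rleStep_append cs [(g, k)] (getCategory c) 1

theorem fRun_head (g : Int) (k : Nat) (cs : List Char) :
    ∃ k' rest, fRun g k cs = (g, k') :: rest := by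
  induction cs generalizing k with
  | nil => exact ⟨k, [], rfl⟩
  | cons c rest ih =>
    rw [fRun_cons]
    by_cases h : g = getCategory c
    · rw [if_pos h]; exact ih (k + 1)
    · rw [if_neg h]; exact ⟨k, _, rfl⟩

-- once A's state is a fixed category g, the loop returns i plus the growth of the head run
theorem aLoop_fRun (n : Nat) (cs : List Char) :
    ∀ (i k : Nat) (g : Int), g ≠ -1 → i + cs.length = n →
      ∀ k' rest, fRun g k cs = (g, k') :: rest →
        aLoop n cs i g = (i : Int) + (k' : Int) - (k : Int) := by
  induction cs with
  | nil =>
    intro i k g _ hn k' rest h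
    simp only [fRun, List.foldl_nil, List.cons.injEq, Prod.mk.injEq] at h
    obtain ⟨⟨-, hk⟩, -⟩ := h
    simp only [List.length_nil, Nat.add_zero] at hn
    simp only [aLoop]
    omega
  | cons c cs ih =>
    intro i k g hg hn k' rest h
    rw [fRun_cons] at h
    simp only [aLoop, if_neg hg]
    by_cases hc : getCategory c = g
    · simp only [hc, ne_eq, not_true_eq_false, if_false]
      rw [if_pos hc.symm] at h
      have := ih (i + 1) (k + 1) g hg (by simp at hn ⊢; omega) k' rest h
      rw [this]; push_cast; ring
    · rw [if_neg (fun he => hc he.symm)] at h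
      cases h
      simp only [ne_eq, hc, not_false_eq_true, if_true]
      omega

-- B's final arithmetic on the runs of the suffix, with s replaced by the index i
def interp (n i : Nat) (runs : List (Int × Nat)) : Int :=
  match runs with
  | [] => (n : Int)
  | (g, k) :: rest =>
    if g ≠ 0 then (i : Int) + (k : Int)
    else
      match rest with
      | [] => (n : Int)
      | (_, k2) :: _ => (i : Int) + (k : Int) + (k2 : Int)

-- main invariant: A's loop (state CAT_NONE) equals B's arithmetic on the RLE
theorem aLoop_interp (n : Nat) (cs : List Char) :
    ∀ i : Nat, i + cs.length = n →
      aLoop n cs i (-1) = interp n i (cs.foldl rleStep []) := by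
  induction cs with
  | nil => intro i _; rfl
  | cons c cs ih =>
    intro i hn
    have hlen : (i + 1) + cs.length = n := by simp at hn ⊢; omega
    have hfold : ∀ (d : Char) (ds : List Char),
        (d :: ds).foldl rleStep [] = fRun (getCategory d) 1 ds := fun _ _ => rfl
    simp only [aLoop, if_pos rfl]
    by_cases hc : getCategory c = 0
    · -- space: A keeps CAT_NONE; the leading space run absorbs c
      simp only [hc, ne_eq, not_true_eq_false, if_false]
      rw [ih (i + 1) hlen, hfold c cs, hc]
      cases hcs : cs.foldl rleStep [] with
      | nil =>
        cases cs with
        | nil => simp [fRun, interp]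
        | cons d ds =>
          exfalso
          obtain ⟨k', rest, h⟩ := fRun_head (getCategory d) 1 ds
          rw [hfold d ds, h] at hcs
          cases hcs
      | cons p t =>
        obtain ⟨g', k⟩ := p
        -- cs.foldl from [] = fRun g' k₀ … ; relate fRun 0 1 cs to (g',k)::t
        cases cs with
        | nil => cases hcs
        | cons d ds =>
          rw [hfold d ds] at hcs
          have hd : fRun (getCategory d) 1 ds = (g', k) :: t := hcs
          obtain ⟨k', rest, hh⟩ := fRun_head (getCategory d) 1 ds
          rw [hd] at hh
          have hg' : g' = getCategory d := by cases hh; rfl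
          rw [show fRun 0 1 (d :: ds) =
              if (0 : Int) = getCategory d then fRun 0 2 ds
              else (0, 1) :: fRun (getCategory d) 1 ds from fRun_cons 0 1 d ds]
          by_cases hd0 : (0 : Int) = getCategory d
          · -- d is a space too: fRun 0 2 ds has head (0, k+1) where fRun 0 1 ds = (0,k)::t
            rw [if_pos hd0]
            have hgrow : ∀ ds : List Char, ∀ k : Nat,
                ∀ k' rest, fRun 0 (k : Nat) ds = (0, k') :: rest →
                  fRun 0 (k + 1) ds = (0, k' + 1) :: rest := by
              intro ds
              induction ds with
              | nil =>
                intro k k' rest h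
                simp only [fRun, List.foldl_nil, List.cons.injEq, Prod.mk.injEq] at h ⊢
                obtain ⟨⟨-, rfl⟩, rfl⟩ := h
                constructor <;> trivial
              | cons e es ihe =>
                intro k k' rest h
                rw [fRun_cons] at h ⊢
                by_cases he : (0 : Int) = getCategory e
                · rw [if_pos he] at h ⊢; exact ihe (k + 1) k' rest h
                · rw [if_neg he] at h ⊢; cases h; rfl
            have hg0 : g' = 0 := by rw [hg', ← hd0]
            have hd2 : fRun 0 1 ds = (0, k) :: t := by rw [hd0, hd, hg0, ← hd0]
            have h2 := hgrow ds 1 k t hd2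
            rw [h2, hg0]
            cases t with
            | nil => simp [interp]
            | cons q u =>
              obtain ⟨gq, kq⟩ := q
              simp only [interp, ne_eq, not_true_eq_false, if_false, reduceIte]
              push_cast; ring
          · rw [if_neg hd0, hd]
            have hg'ne : g' ≠ 0 := by rw [hg']; exact fun he => hd0 he.symm
            simp only [interp, ne_eq, hg'ne, not_false_eq_true, if_true, reduceIte]
            push_cast; ring_nf
            simp [hg'ne]
    · -- non-space: state becomes getCategory c; use aLoop_fRun
      simp only [ne_eq, hc, not_false_eq_true, if_true]
      obtain ⟨k', rest, hh⟩ := fRun_head (getCategory c) 1 cs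
      have := aLoop_fRun n cs (i + 1) 1 (getCategory c) (getCategory_ne_neg_one c) hlen k' rest hh
      rw [this, hfold c cs, hh]
      simp only [interp, ne_eq, hc, not_false_eq_true, if_true]
      push_cast; ring

-- ===== VERDICT (by name: the statement is the Claim_ definition above) =====
theorem get_next_word_position_spec : Claim_equal_get_next_word_position := by
  intro text start _ hne
  simp only [Spec_get_next_word_position, get_next_word_position, get_next_word_position_alt]
  have hlen : 0 < text.toList.length := by
    rcases h : text.toList with - | -
    · exact absurd (String.toList_eq_nil_iff.mp h) hne
    · simp
  set cs := text.toList with hcs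
  set n := cs.length with hn
  set s : Int := min (max 0 start) ((n : Int) - 1) with hs
  have hs0 : 0 ≤ s := by omega
  have hsn : s.toNat ≤ n := by omega
  have hslice : PySem.List.slice cs (some s) none = cs.drop s.toNat := by
    rw [show s = ((s.toNat : Nat) : Int) by omega]
    exact PySem.List.slice_from_natCast cs s.toNat
  rw [hslice]
  have hmain := aLoop_interp n (cs.drop s.toNat) s.toNat (by simp [hn]; omega)
  rw [hmain]
  -- align interp with B's inline match (s = s.toNat as Int)
  have hsInt : ((s.toNat : Nat) : Int) = s := by omega
  cases hr : (cs.drop s.toNat).foldl rleStep [] with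
  | nil => simp [interp]
  | cons p t =>
    obtain ⟨g, k⟩ := p
    cases t with
    | nil => by_cases hg : g ≠ 0 <;> simp [interp, hg, hsInt]
    | cons q u => obtain ⟨g2, k2⟩ := q; by_cases hg : g ≠ 0 <;> simp [interp, hg, hsInt] <;> ring
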